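-- pv_equiv track=rewrite | github.com/Hugo0/wordle | scripts/freeze_all_history.py | ring_select
-- ===== SOURCE A (Python) =====
-- def ring_select(precomputed: list[tuple[str, str]], exclude: set[str], day_h: str) -> str | None:
--     """Pick the first word on the hash ring >= day_h, skipping excluded."""
--     first_valid = None
--     for word_h, word in precomputed:
--         if word in exclude:
--             continue
--         if first_valid is None:
--             first_valid = word
--         if word_h >= day_h:
--             return word
--     return first_valid
-- ===== SOURCE B (Python) =====
-- def ring_select(precomputed, exclude, day_h):
--     """Pick the first word on the hash ring >= day_h, skipping excluded.
--
--     Back-to-front pass: walk the ring in reverse with last-write-wins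
--     overwrites, so the values left at the end are the first-in-order
--     qualifying word and the first-in-order valid word; no early exit,
--     no forward accumulator.
--     """
--     found = None
--     first_valid = None
--     for h, w in reversed(precomputed):
--         if w in exclude:
--             continue
--         first_valid = w
--         if h >= day_h:
--             found = w
--     return found if found is not None else first_valid
-- ===== Notes on version B (the rewrite author's own statement) =====
-- stated objective: alternative
-- what changed: Replaces A's forward pass with early return and a first_valid accumulator by a reverse traversal with last-write-wins overwrites: walking back-to-front, each non-excluded word overwrites first_valid and (if qualifying) found, so the values remaining are the first-in-order ones; result is found or first_valid.
import Mathlib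
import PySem

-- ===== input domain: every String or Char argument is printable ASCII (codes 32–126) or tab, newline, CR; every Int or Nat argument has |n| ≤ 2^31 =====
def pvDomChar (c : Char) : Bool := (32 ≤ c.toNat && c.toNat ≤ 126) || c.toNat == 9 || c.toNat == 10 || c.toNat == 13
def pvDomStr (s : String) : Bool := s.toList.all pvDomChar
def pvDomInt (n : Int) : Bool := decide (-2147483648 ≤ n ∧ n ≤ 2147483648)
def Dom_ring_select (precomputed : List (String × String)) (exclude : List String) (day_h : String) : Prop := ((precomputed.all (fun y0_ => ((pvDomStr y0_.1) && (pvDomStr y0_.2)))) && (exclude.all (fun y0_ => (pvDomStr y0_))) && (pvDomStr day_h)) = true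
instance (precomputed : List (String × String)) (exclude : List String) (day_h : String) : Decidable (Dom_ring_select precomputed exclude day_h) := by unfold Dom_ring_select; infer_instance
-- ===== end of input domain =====

-- B replaces A's forward early-return pass by a reverse traversal with last-write-wins overwrites (objective: alternative).

-- ===== PORT A =====
-- the for-loop of A: state is first_valid; returns on the first word_h >= day_h
def ringSelGoA (exclude : List String) (day_h : String) :
    List (String × String) → Option String → Option String
  | [], firstValid => firstValid
  | (word_h, word) :: rest, firstValid =>
    if exclude.contains word then
      ringSelGoA exclude day_h rest firstValid
    else
      let firstValid' := match firstValid with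
        | none => some word
        | some w => some w
      if day_h ≤ word_h then some word
      else ringSelGoA exclude day_h rest firstValid'

def ring_select (precomputed : List (String × String)) (exclude : List String) (day_h : String) : Option String :=
  ringSelGoA exclude day_h precomputed none

-- ===== PORT B =====
-- Source B's reversed for-loop: fold over the reversed list carrying (found, first_valid), overwriting
def ringSelStepB (exclude : List String) (day_h : String)
    (st : Option String × Option String) (p : String × String) : Option String × Option String :=
  if exclude.contains p.2 then st
  else ((if day_h ≤ p.1 then some p.2 else st.1), some p.2)

def ring_select_alt (precomputed : List (String × String)) (exclude : List String) (day_h : String) : Option String :=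
  let st := precomputed.reverse.foldl (ringSelStepB exclude day_h) (none, none)
  match st.1 with
  | some w => some w
  | none => st.2

-- ===== PRECONDITION & SPEC =====
def Spec_ring_select (precomputed : List (String × String)) (exclude : List String) (day_h : String) (out : Option String) : Prop := out = ring_select_alt precomputed exclude day_h
instance (precomputed : List (String × String)) (exclude : List String) (day_h : String) (out : Option String) : Decidable (Spec_ring_select precomputed exclude day_h out) := by unfold Spec_ring_select; infer_instance

-- ===== CLAIM (what is proved, stated in full; the proofs are below) =====
def Claim_equal_ring_select : Prop := ∀ (precomputed : List (String × String)) (exclude : List String) (day_h : String), Dom_ring_select precomputed exclude day_h → Spec_ring_select precomputed exclude day_h (ring_select precomputed exclude day_h)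

-- ===== LEMMAS AND PROOFS =====

-- loop invariant for A's pass: the accumulator is the fallback once no hash qualifies
theorem ringSelGoA_eq (exclude : List String) (day_h : String) :
    ∀ (pre : List (String × String)) (acc : Option String),
      ringSelGoA exclude day_h pre acc =
        (match (pre.filter (fun p => !(exclude.contains p.2))).find? (fun p => day_h ≤ p.1) with
         | some p => some p.2
         | none =>
           match acc with
           | some w => some w
           | none => ((pre.filter (fun p => !(exclude.contains p.2))).head?).map Prod.snd) := by
  intro pre
  induction pre with
  | nil => intro acc; cases acc <;> rfl
  | cons hd tl ih =>
    intro acc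
    obtain ⟨word_h, word⟩ := hd
    by_cases hex : exclude.contains word = true
    · have hfil : ((word_h, word) :: tl).filter (fun p => !(exclude.contains p.2)) =
          tl.filter (fun p => !(exclude.contains p.2)) := by
        simp only [List.filter_cons]
        simp [show word ∈ exclude by simpa using hex]
      simp only [ringSelGoA, if_pos hex, hfil]
      exact ih acc
    · have hfil : ((word_h, word) :: tl).filter (fun p => !(exclude.contains p.2)) =
          (word_h, word) :: tl.filter (fun p => !(exclude.contains p.2)) := by
        simp only [List.filter_cons]
        simp [show word ∉ exclude by simpa using hex]
      by_cases hge : day_h ≤ word_h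
      · have hg : (decide (day_h ≤ ((word_h, word) : String × String).1)) = true :=
          decide_eq_true hge
        simp only [ringSelGoA, if_neg hex, if_pos hge, hfil, List.find?_cons, hg]
      · have hg : (decide (day_h ≤ ((word_h, word) : String × String).1)) = false :=
          decide_eq_false hge
        cases acc with
        | none =>
          simp only [ringSelGoA, if_neg hex, if_neg hge, hfil, List.find?_cons, hg, ih,
            List.head?_cons, Option.map_some]
        | some w =>
          simp only [ringSelGoA, if_neg hex, if_neg hge, hfil, List.find?_cons, hg, ih]

-- B's reverse fold computes (first qualifying, first valid) of the filtered list
theorem ringSelFoldB_eq (exclude : List String) (day_h : String) :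
    ∀ (pre : List (String × String)),
      pre.reverse.foldl (ringSelStepB exclude day_h) (none, none) =
        (((pre.filter (fun p => !(exclude.contains p.2))).find? (fun p => day_h ≤ p.1)).map Prod.snd,
         ((pre.filter (fun p => !(exclude.contains p.2))).head?).map Prod.snd) := by
  intro pre
  rw [List.foldl_reverse]
  induction pre with
  | nil => rfl
  | cons hd tl ih =>
    obtain ⟨word_h, word⟩ := hd
    by_cases hex : exclude.contains word = true
    · have hfil : ((word_h, word) :: tl).filter (fun p => !(exclude.contains p.2)) =
          tl.filter (fun p => !(exclude.contains p.2)) := by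
        simp only [List.filter_cons]
        simp [show word ∈ exclude by simpa using hex]
      simp only [List.foldr_cons]
      rw [ih]
      simp only [ringSelStepB, if_pos hex, hfil]
    · have hfil : ((word_h, word) :: tl).filter (fun p => !(exclude.contains p.2)) =
          (word_h, word) :: tl.filter (fun p => !(exclude.contains p.2)) := by
        simp only [List.filter_cons]
        simp [show word ∉ exclude by simpa using hex]
      simp only [List.foldr_cons]
      rw [ih, hfil]
      simp only [ringSelStepB, if_neg hex, List.find?_cons, List.head?_cons, Option.map_some]
      by_cases hge : day_h ≤ word_h
      · rw [if_pos hge]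
        simp only [decide_eq_true hge, Option.map_some]
      · rw [if_neg hge]
        simp only [decide_eq_false hge]

-- ===== VERDICT (by name: the statement is the Claim_ definition above) =====
theorem ring_select_spec : Claim_equal_ring_select := by
  intro precomputed exclude day_h _
  unfold Spec_ring_select ring_select ring_select_alt
  rw [ringSelGoA_eq, ringSelFoldB_eq]
  cases (precomputed.filter (fun p => !(exclude.contains p.2))).find? (fun p => day_h ≤ p.1) <;> rfl
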